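-- pv_equiv track=rewrite | github.com/1Meriem1/appPWFORTRESS.py | app1.py | get_verdict
-- ===== SOURCE A (Python) =====
-- def get_verdict(length, pw):
--     has_upper   = any(c.isupper() for c in pw)
--     has_lower   = any(c.islower() for c in pw)
--     has_digit   = any(c.isdigit() for c in pw)
--     has_special = any(not c.isalnum() for c in pw)
--     score = 0
--     if length >= 8:  score += 2
--     if length >= 12: score += 2
--     if length >= 16: score += 1
--     if has_upper:    score += 1
--     if has_lower:    score += 1
--     if has_digit:    score += 1
--     if has_special:  score += 2
--     if score <= 2:   return "CRITIQUE",  "#ff2d55", 10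
--     if score <= 4:   return "FAIBLE",    "#ff9f0a", 30
--     if score <= 6:   return "CORRECT",   "#ffd60a", 55
--     if score <= 8:   return "FORT",      "#34c759", 78
--     return             "FORTERESSE", "#00f5c4", 100
-- ===== SOURCE B (Python) =====
-- _WEIGHT = [(m & 1) + ((m >> 1) & 1) + ((m >> 2) & 1) + 2 * ((m >> 3) & 1)
--            for m in range(16)]
--
-- _VERDICTS = ([("CRITIQUE", "#ff2d55", 10)] * 3
--              + [("FAIBLE", "#ff9f0a", 30)] * 2
--              + [("CORRECT", "#ffd60a", 55)] * 2
--              + [("FORT", "#34c759", 78)] * 2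
--              + [("FORTERESSE", "#00f5c4", 100)] * 2)
--
-- def get_verdict(length, pw):
--     # OR together one bit per character class, then look the bonus up in a table;
--     # the verdict is read off a 10-entry table indexed directly by the score.
--     mask = 0
--     for c in pw:
--         mask |= (c.isupper()
--                  | c.islower() << 1
--                  | c.isdigit() << 2
--                  | (not c.isalnum()) << 3)
--     score = sum(p for t, p in ((8, 2), (12, 2), (16, 1)) if length >= t) + _WEIGHT[mask]
--     return _VERDICTS[score]
-- ===== Notes on version B (the rewrite author's own statement) =====
-- stated objective: alternative
-- what changed: B replaces the four any() scans and both if-cascades by a fold that ORs one bit per character class into a 4-bit mask, a 16-entry weight table indexed by that mask for the class bonus, and an 11-entry verdict table indexed directly by the score.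
import Mathlib
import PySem

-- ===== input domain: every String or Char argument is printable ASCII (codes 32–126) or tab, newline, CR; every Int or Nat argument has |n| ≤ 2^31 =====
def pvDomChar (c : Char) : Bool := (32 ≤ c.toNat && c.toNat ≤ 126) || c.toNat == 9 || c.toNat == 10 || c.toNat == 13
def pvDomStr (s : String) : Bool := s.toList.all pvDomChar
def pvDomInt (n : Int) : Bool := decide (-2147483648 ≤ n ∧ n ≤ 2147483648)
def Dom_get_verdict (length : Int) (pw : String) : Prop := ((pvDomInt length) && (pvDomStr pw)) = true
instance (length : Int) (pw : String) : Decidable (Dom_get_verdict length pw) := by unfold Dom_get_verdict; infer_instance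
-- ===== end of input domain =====

-- B: folds a 4-bit class bitmask over the password and reads the bonus and the verdict off precomputed tables, instead of four any() scans and two if-cascades (alternative decomposition, same cost).


-- ===== PORT A =====
def get_verdict (length : Int) (pw : String) : String × String × Int :=
  let cs := pw.toList
  let has_upper   := cs.any (fun c => PySem.Chars.isupper c)
  let has_lower   := cs.any (fun c => PySem.Chars.islower c)
  let has_digit   := cs.any (fun c => PySem.Chars.isdigit c)
  let has_special := cs.any (fun c => ! PySem.Chars.isalnum c)
  let score : Int := 0
  let score := if length ≥ 8 then score + 2 else score
  let score := if length ≥ 12 then score + 2 else score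
  let score := if length ≥ 16 then score + 1 else score
  let score := if has_upper then score + 1 else score
  let score := if has_lower then score + 1 else score
  let score := if has_digit then score + 1 else score
  let score := if has_special then score + 2 else score
  if score ≤ 2 then ("CRITIQUE", "#ff2d55", 10)
  else if score ≤ 4 then ("FAIBLE", "#ff9f0a", 30)
  else if score ≤ 6 then ("CORRECT", "#ffd60a", 55)
  else if score ≤ 8 then ("FORT", "#34c759", 78)
  else ("FORTERESSE", "#00f5c4", 100)

-- ===== PORT B =====
-- per-character class bit pattern: bit0 upper, bit1 lower, bit2 digit, bit3 special
def pvEnc (c : Char) : Nat :=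
  (PySem.Chars.isupper c).toNat
    ||| (PySem.Chars.islower c).toNat <<< 1
    ||| (PySem.Chars.isdigit c).toNat <<< 2
    ||| (! PySem.Chars.isalnum c).toNat <<< 3

-- Source B's mask loop: OR the class bits of every character together
def pvMask : List Char → Nat → Nat
  | [], m => m
  | c :: rest, m => pvMask rest (m ||| pvEnc c)

-- Source B's _WEIGHT table, built the same way
def pvWEIGHT : List Int :=
  (List.range 16).map (fun m =>
    ((((m &&& 1) + ((m >>> 1) &&& 1) + ((m >>> 2) &&& 1) + 2 * ((m >>> 3) &&& 1) : Nat) : Int)))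

-- Source B's _VERDICTS table
def pvVERDICTS : List (String × String × Int) :=
  List.replicate 3 ("CRITIQUE", "#ff2d55", 10)
    ++ List.replicate 2 ("FAIBLE", "#ff9f0a", 30)
    ++ List.replicate 2 ("CORRECT", "#ffd60a", 55)
    ++ List.replicate 2 ("FORT", "#34c759", 78)
    ++ List.replicate 2 ("FORTERESSE", "#00f5c4", 100)

def get_verdict_alt (length : Int) (pw : String) : String × String × Int :=
  let mask := pvMask pw.toList 0
  let score : Int :=
    (([(8, 2), (12, 2), (16, 1)] : List (Int × Int)).foldl
      (fun acc tp => if length ≥ tp.1 then acc + tp.2 else acc) 0)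
    + (PySem.List.pyGet? pvWEIGHT (mask : Int)).getD 0
  -- mask < 16 and 0 ≤ score ≤ 10 always, so both lookups hit the tables
  (PySem.List.pyGet? pvVERDICTS score).getD ("", "", 0)

-- ===== PRECONDITION & SPEC =====
def Spec_get_verdict (length : Int) (pw : String) (out : String × String × Int) : Prop := out = get_verdict_alt length pw
instance (length : Int) (pw : String) (out : String × String × Int) : Decidable (Spec_get_verdict length pw out) := by unfold Spec_get_verdict; infer_instance

-- ===== CLAIM (what is proved, stated in full; the proofs are below) =====
def Claim_equal_get_verdict : Prop := ∀ (length : Int) (pw : String), Dom_get_verdict length pw → Spec_get_verdict length pw (get_verdict length pw)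

-- ===== LEMMAS AND PROOFS =====

-- mask encoding of four flags
def pvEncB (u l d s : Bool) : Nat :=
  u.toNat ||| l.toNat <<< 1 ||| d.toNat <<< 2 ||| s.toNat <<< 3

theorem pvEnc_eq (c : Char) :
    pvEnc c = pvEncB (PySem.Chars.isupper c) (PySem.Chars.islower c)
      (PySem.Chars.isdigit c) (! PySem.Chars.isalnum c) := rfl

theorem pvEncB_or (u l d s u' l' d' s' : Bool) :
    pvEncB u l d s ||| pvEncB u' l' d' s' = pvEncB (u || u') (l || l') (d || d') (s || s') := by
  revert u l d s u' l' d' s'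
  decide

-- the mask fold computes exactly the OR of the four any() scans, bit-encoded
theorem pvMask_eq (cs : List Char) (m : Nat) :
    pvMask cs m = m ||| pvEncB (cs.any (fun c => PySem.Chars.isupper c))
      (cs.any (fun c => PySem.Chars.islower c))
      (cs.any (fun c => PySem.Chars.isdigit c))
      (cs.any (fun c => ! PySem.Chars.isalnum c)) := by
  induction cs generalizing m with
  | nil => simp [pvMask, pvEncB]
  | cons c rest ih =>
    simp only [pvMask, List.any_cons, ih, pvEnc_eq, Nat.or_assoc, pvEncB_or]

-- A's score-and-cascade tail equals B's table lookups, for arbitrary flags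
theorem pvTail_eq (length : Int) (hu hl hd hs : Bool) :
    (let score : Int := 0
     let score := if length ≥ 8 then score + 2 else score
     let score := if length ≥ 12 then score + 2 else score
     let score := if length ≥ 16 then score + 1 else score
     let score := if hu then score + 1 else score
     let score := if hl then score + 1 else score
     let score := if hd then score + 1 else score
     let score := if hs then score + 2 else score
     if score ≤ 2 then ("CRITIQUE", "#ff2d55", (10 : Int))
     else if score ≤ 4 then ("FAIBLE", "#ff9f0a", 30)
     else if score ≤ 6 then ("CORRECT", "#ffd60a", 55)
     else if score ≤ 8 then ("FORT", "#34c759", 78)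
     else ("FORTERESSE", "#00f5c4", 100)) =
    (PySem.List.pyGet? pvVERDICTS
      ((([(8, 2), (12, 2), (16, 1)] : List (Int × Int)).foldl
          (fun acc tp => if length ≥ tp.1 then acc + tp.2 else acc) 0)
        + (PySem.List.pyGet? pvWEIGHT ((pvEncB hu hl hd hs : Nat) : Int)).getD 0)).getD ("", "", 0) := by
  cases hu <;> cases hl <;> cases hd <;> cases hs <;>
    by_cases h8 : length ≥ 8 <;> by_cases h12 : length ≥ 12 <;> by_cases h16 : length ≥ 16 <;>
    simp only [List.foldl_cons, List.foldl_nil, h8, h12, h16, if_true, if_false] <;>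
    first
      | (exfalso; omega)
      | decide

theorem get_verdict_eq_alt (length : Int) (pw : String) :
    get_verdict length pw = get_verdict_alt length pw := by
  unfold get_verdict get_verdict_alt
  rw [pvMask_eq, Nat.zero_or]
  exact pvTail_eq length _ _ _ _

-- ===== VERDICT (by name: the statement is the Claim_ definition above) =====
theorem get_verdict_spec : Claim_equal_get_verdict := by
  intro length pw _
  exact get_verdict_eq_alt length pw
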